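-- pv_equiv track=rewrite | github.com/ethanm88/GPTGeoChat | utils/format_utils.py | sort_models_results
-- ===== SOURCE A (Python) =====
-- def sort_models_results(results, baselines, base_models, finetuned_models):
--     baseline_results = [
--         result for result in results if result['model'] in baselines]
--     base_model_results = [
--         result for result in results if result['model'] in base_models]
--     finetuned_model_results = [
--         result for result in results if result['model'] in finetuned_models]
--     # sort results array by the model key in each dict
--     baseline_results = sorted(baseline_results, key=lambda x: x['model'])
--     base_model_results = sorted(base_model_results, key=lambda x: x['model'])
--     finetuned_model_results = sorted(
--         finetuned_model_results, key=lambda x: x['model'])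
--     sorted_results = baseline_results + base_model_results + finetuned_model_results
--     return sorted_results
-- ===== SOURCE B (Python) =====
-- def sort_models_results(results, baselines, base_models, finetuned_models):
--     # one global stable sort, then three order-preserving partition passes
--     ordered = sorted(results, key=lambda x: x['model'])
--     baseline_results = [r for r in ordered if r['model'] in baselines]
--     base_model_results = [r for r in ordered if r['model'] in base_models]
--     finetuned_model_results = [r for r in ordered if r['model'] in finetuned_models]
--     return baseline_results + base_model_results + finetuned_model_results
-- ===== Notes on version B (the rewrite author's own statement) =====
-- stated objective: alternative
-- what changed: Instead of filtering results into three groups and sorting each group separately, B sorts the whole list once (stable, by model) and then extracts the three groups by order-preserving filters over that one sorted list.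
import Mathlib
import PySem

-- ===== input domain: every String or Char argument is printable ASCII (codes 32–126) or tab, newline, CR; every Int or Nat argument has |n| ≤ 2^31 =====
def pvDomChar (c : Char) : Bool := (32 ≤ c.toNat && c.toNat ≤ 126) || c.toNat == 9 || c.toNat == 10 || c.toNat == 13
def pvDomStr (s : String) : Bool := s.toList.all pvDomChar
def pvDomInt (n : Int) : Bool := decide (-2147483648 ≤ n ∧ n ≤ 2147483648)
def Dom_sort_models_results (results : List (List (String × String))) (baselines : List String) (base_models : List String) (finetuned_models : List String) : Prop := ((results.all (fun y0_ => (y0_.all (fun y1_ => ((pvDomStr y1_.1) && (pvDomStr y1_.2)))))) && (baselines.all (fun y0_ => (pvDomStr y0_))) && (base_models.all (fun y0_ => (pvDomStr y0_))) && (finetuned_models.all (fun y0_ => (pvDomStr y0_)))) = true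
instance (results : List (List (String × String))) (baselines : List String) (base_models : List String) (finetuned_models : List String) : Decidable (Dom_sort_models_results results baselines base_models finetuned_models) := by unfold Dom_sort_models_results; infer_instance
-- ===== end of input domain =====

-- B sorts the whole list once (stable, by model) and extracts the three groups by
-- order-preserving filters, instead of A's filter-first-then-sort-each-group; same cost class.

-- result['model']: first-match lookup in the dict; total with a default, Pre_ excludes the KeyError inputs
def pvModel (r : List (String × String)) : String := (PySem.Dict.mk r).getD "model" ""

-- ===== PORT A =====
def sort_models_results (results : List (List (String × String))) (baselines : List String) (base_models : List String) (finetuned_models : List String) : List (List (String × String)) :=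
  let baseline_results := results.filter (fun result => baselines.contains (pvModel result))
  let base_model_results := results.filter (fun result => base_models.contains (pvModel result))
  let finetuned_model_results := results.filter (fun result => finetuned_models.contains (pvModel result))
  let baseline_results := PySem.List.sorted baseline_results (fun x => pvModel x)
  let base_model_results := PySem.List.sorted base_model_results (fun x => pvModel x)
  let finetuned_model_results := PySem.List.sorted finetuned_model_results (fun x => pvModel x)
  baseline_results ++ base_model_results ++ finetuned_model_results

-- ===== PORT B =====
def sort_models_results_alt (results : List (List (String × String))) (baselines : List String) (base_models : List String) (finetuned_models : List String) : List (List (String × String)) :=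
  let ordered := PySem.List.sorted results (fun x => pvModel x)
  let baseline_results := ordered.filter (fun r => baselines.contains (pvModel r))
  let base_model_results := ordered.filter (fun r => base_models.contains (pvModel r))
  let finetuned_model_results := ordered.filter (fun r => finetuned_models.contains (pvModel r))
  baseline_results ++ base_model_results ++ finetuned_model_results

-- ===== PRECONDITION & SPEC =====
-- Pre_ excludes exactly the inputs where some result dict lacks the 'model' key, on which A raises KeyError.
def Pre_sort_models_results (results : List (List (String × String))) (baselines : List String) (base_models : List String) (finetuned_models : List String) : Prop :=
  (results.all (fun r => r.any (fun kv => kv.1 == "model"))) = true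
instance (results : List (List (String × String))) (baselines : List String) (base_models : List String) (finetuned_models : List String) : Decidable (Pre_sort_models_results results baselines base_models finetuned_models) := by unfold Pre_sort_models_results; infer_instance
def pvWitness_sort_models_results : (List (List (String × String))) × List String × List String × List String :=
  ([[("model", "gpt-4")], [("model", "llava")]], ["llava"], ["gpt-4"], [])

def Spec_sort_models_results (results : List (List (String × String))) (baselines : List String) (base_models : List String) (finetuned_models : List String) (out : List (List (String × String))) : Prop := out = sort_models_results_alt results baselines base_models finetuned_models
instance (results : List (List (String × String))) (baselines : List String) (base_models : List String) (finetuned_models : List String) (out : List (List (String × String))) : Decidable (Spec_sort_models_results results baselines base_models finetuned_models out) := by unfold Spec_sort_models_results; infer_instance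

-- ===== CLAIM (what is proved, stated in full; the proofs are below) =====
def Claim_equal_sort_models_results : Prop := ∀ (results : List (List (String × String))) (baselines : List String) (base_models : List String) (finetuned_models : List String), Dom_sort_models_results results baselines base_models finetuned_models → Pre_sort_models_results results baselines base_models finetuned_models → Spec_sort_models_results results baselines base_models finetuned_models (sort_models_results results baselines base_models finetuned_models)

-- ===== LEMMAS AND PROOFS =====

-- filtering commutes with a single insertion step, provided the list is already key-sorted
theorem filter_insertBy {α κ : Type} [LinearOrder κ] (key : α → κ) (p : α → Bool) (x : α) :
    ∀ ys : List α, ys.Pairwise (fun a b => key a ≤ key b) →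
    (PySem.List.insertBy (fun a b => decide (key a < key b)) x ys).filter p =
      if p x then PySem.List.insertBy (fun a b => decide (key a < key b)) x (ys.filter p)
      else ys.filter p := by
  intro ys
  induction ys with
  | nil =>
    intro _
    by_cases hpx : p x = true <;> simp [PySem.List.insertBy, List.filter, hpx]
  | cons y ys ih =>
    intro h
    have hy : ∀ b ∈ ys, key y ≤ key b := by
      intro b hb; exact (List.pairwise_cons.mp h).1 b hb
    have hys : ys.Pairwise (fun a b => key a ≤ key b) := (List.pairwise_cons.mp h).2
    simp only [PySem.List.insertBy]
    by_cases hlt : key x < key y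
    · simp only [hlt, decide_true, if_true]
      by_cases hpy : p y = true
      · by_cases hpx : p x = true <;>
          simp [List.filter_cons, hpy, hpx, PySem.List.insertBy, hlt]
      · -- y is dropped by the filter; x still lands at the front of filter ys
        have hfront : ∀ z ∈ ys.filter p, key x < key z := by
          intro z hz
          exact lt_of_lt_of_le hlt (hy z (List.mem_of_mem_filter hz))
        by_cases hpx : p x = true
        · simp only [List.filter_cons, hpy, hpx, if_true, Bool.false_eq_true, if_false]
          cases hfil : ys.filter p with
          | nil => simp [PySem.List.insertBy]
          | cons z zs =>
            have : key x < key z := hfront z (by rw [hfil]; exact List.mem_cons_self)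
            simp [PySem.List.insertBy, this]
        · simp [List.filter_cons, hpy, hpx]
    · simp only [hlt, decide_false, Bool.false_eq_true, if_false]
      by_cases hpy : p y = true <;> by_cases hpx : p x = true <;>
        simp [List.filter_cons, hpy, hpx, ih hys, PySem.List.insertBy, hlt]

-- filtering commutes with the stable insertion sort
theorem sorted_filter {α κ : Type} [LinearOrder κ] (key : α → κ) (p : α → Bool) :
    ∀ l : List α, (PySem.List.sorted l key).filter p = PySem.List.sorted (l.filter p) key := by
  intro l
  induction l using List.reverseRecOn with
  | nil => rfl
  | append_singleton l x ih =>
    have hstep : ∀ m : List α, PySem.List.sorted (m ++ [x]) key =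
        PySem.List.insertBy (fun a b => decide (key a < key b)) x (PySem.List.sorted m key) := by
      intro m
      rw [PySem.List.sorted_eq_foldl_insertBy, PySem.List.sorted_eq_foldl_insertBy,
        List.foldl_append]
      rfl
    rw [hstep, filter_insertBy key p x _ (PySem.List.sorted_pairwise l key),
      List.filter_append, ih]
    by_cases hpx : p x = true
    · simp only [List.filter_cons, hpx, if_true, List.filter_nil]
      rw [hstep]
    · simp [hpx]

-- ===== VERDICT (by name: the statement is the Claim_ definition above) =====
theorem sort_models_results_spec : Claim_equal_sort_models_results := by
  intro results baselines base_models finetuned_models _ _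
  unfold Spec_sort_models_results sort_models_results sort_models_results_alt
  simp only [sorted_filter]
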